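-- pv_equiv track=rewrite | github.com/yiclwh/-2018 | left to right 3 direction.py | addPath
-- ===== SOURCE A (Python) =====
-- def addPath(prev, delta):
--     prev_l = len(prev)
--     l = prev_l + delta
--     res = []
--     for i in range(l):
--         temp = 0
--         if 0 <= i - 1 < prev_l:
--             temp += prev[i-1]
--         if 0 <= i < prev_l:
--             temp += prev[i]
--         if 0 <= i + 1 < prev_l:
--             temp += prev[i+1]
--         res.append(temp)
--     return res
-- ===== SOURCE B (Python) =====
-- def addPath(prev, delta):
--     l = len(prev) + delta
--     res = [0] * l
--     for j in range(len(prev)):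
--         for d in (-1, 0, 1):
--             idx = j + d
--             if 0 <= idx < l:
--                 res[idx] += prev[j]
--     return res
-- ===== Notes on version B (the rewrite author's own statement) =====
-- stated objective: alternative
-- what changed: B preallocates the output as [0]*l and scatters each prev[j] into its up-to-three target slots j-1,j,j+1 (guarded against [0,l)), inverting A's gather loop that iterates over output indices and sums in-range neighbours.
import Mathlib
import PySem

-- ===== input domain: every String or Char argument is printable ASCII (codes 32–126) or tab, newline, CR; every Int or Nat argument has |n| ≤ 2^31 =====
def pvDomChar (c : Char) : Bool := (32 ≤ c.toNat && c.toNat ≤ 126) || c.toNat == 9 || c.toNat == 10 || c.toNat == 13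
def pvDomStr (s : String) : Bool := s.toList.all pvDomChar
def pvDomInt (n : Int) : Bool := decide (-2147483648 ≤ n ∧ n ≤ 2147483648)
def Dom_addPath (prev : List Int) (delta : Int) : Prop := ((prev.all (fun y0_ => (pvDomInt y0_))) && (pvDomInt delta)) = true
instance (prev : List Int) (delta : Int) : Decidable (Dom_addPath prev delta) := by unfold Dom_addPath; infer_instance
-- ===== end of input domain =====

-- B scatters each prev[j] into its up-to-three output slots of a preallocated list instead of
-- gathering neighbour sums per output index (objective: alternative decomposition, same cost).

-- ===== PORT A =====
-- gather: for each output index i, sum the in-range neighbours prev[i-1], prev[i], prev[i+1]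
def addPath (prev : List Int) (delta : Int) : List Int :=
  (PySem.List.pyRange 0 ((prev.length : Int) + delta) 1).foldl
    (fun res i =>
      res ++ [
        (let t1 : Int :=
           if 0 ≤ i - 1 ∧ i - 1 < (prev.length : Int) then 0 + PySem.List.pyGetD prev (i - 1) 0 else 0
         let t2 : Int :=
           if 0 ≤ i ∧ i < (prev.length : Int) then t1 + PySem.List.pyGetD prev i 0 else t1
         if 0 ≤ i + 1 ∧ i + 1 < (prev.length : Int) then t2 + PySem.List.pyGetD prev (i + 1) 0 else t2)])
    []

-- ===== PORT B =====
-- scatter: res = [0]*l, then res[j+d] += prev[j] for d ∈ {-1,0,1} whenever 0 ≤ j+d < l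
def addPath_alt (prev : List Int) (delta : Int) : List Int :=
  (PySem.List.pyRange 0 (prev.length : Int) 1).foldl
    (fun res j =>
      [(-1 : Int), 0, 1].foldl
        (fun res d =>
          let idx := j + d
          if 0 ≤ idx ∧ idx < (prev.length : Int) + delta then
            res.modify idx.toNat (· + PySem.List.pyGetD prev j 0)
          else res)
        res)
    (List.replicate ((prev.length : Int) + delta).toNat 0)

-- ===== PRECONDITION & SPEC =====
def Spec_addPath (prev : List Int) (delta : Int) (out : List Int) : Prop := out = addPath_alt prev delta
instance (prev : List Int) (delta : Int) (out : List Int) : Decidable (Spec_addPath prev delta out) := by unfold Spec_addPath; infer_instance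

-- ===== CLAIM (what is proved, stated in full; the proofs are below) =====
def Claim_equal_addPath : Prop := ∀ (prev : List Int) (delta : Int), Dom_addPath prev delta → Spec_addPath prev delta (addPath prev delta)

-- ===== LEMMAS AND PROOFS =====

-- the per-output-index value A computes (the gather sum)
def gA (prev : List Int) (i : Int) : Int :=
  let t1 : Int :=
    if 0 ≤ i - 1 ∧ i - 1 < (prev.length : Int) then 0 + PySem.List.pyGetD prev (i - 1) 0 else 0
  let t2 : Int :=
    if 0 ≤ i ∧ i < (prev.length : Int) then t1 + PySem.List.pyGetD prev i 0 else t1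
  if 0 ≤ i + 1 ∧ i + 1 < (prev.length : Int) then t2 + PySem.List.pyGetD prev (i + 1) 0 else t2

-- B's per-source-index scatter step
def stepB (prev : List Int) (l : Int) (res : List Int) (j : Int) : List Int :=
  [(-1 : Int), 0, 1].foldl
    (fun res d =>
      let idx := j + d
      if 0 ≤ idx ∧ idx < l then res.modify idx.toNat (· + PySem.List.pyGetD prev j 0) else res)
    res

-- how much source index j adds to output slot k
def contrib (prev : List Int) (l : Int) (k : Nat) (j : Int) : Int :=
  (if j - 1 = (k : Int) ∧ 0 ≤ j - 1 ∧ j - 1 < l then PySem.List.pyGetD prev j 0 else 0) +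
  (if j = (k : Int) ∧ 0 ≤ j ∧ j < l then PySem.List.pyGetD prev j 0 else 0) +
  (if j + 1 = (k : Int) ∧ 0 ≤ j + 1 ∧ j + 1 < l then PySem.List.pyGetD prev j 0 else 0)

lemma condModify_length (c : Prop) [Decidable c] (res : List Int) (m : Nat) (f : Int → Int) :
    (if c then res.modify m f else res).length = res.length := by
  split <;> simp

lemma stepB_length (prev : List Int) (l : Int) (res : List Int) (j : Int) :
    (stepB prev l res j).length = res.length := by
  simp only [stepB, List.foldl_cons, List.foldl_nil]
  simp only [condModify_length]

lemma condModify_getD (idx : Int) (l : Int) (res : List Int) (v : Int) (k : Nat)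
    (hk : k < res.length) (hres : (res.length : Int) = l ∨ l ≤ 0) :
    (if 0 ≤ idx ∧ idx < l then res.modify idx.toNat (· + v) else res).getD k 0 =
      res.getD k 0 + (if idx = (k : Int) ∧ 0 ≤ idx ∧ idx < l then v else 0) := by
  split
  · rename_i h
    have hl : (res.length : Int) = l := by rcases hres with h' | h' <;> omega
    rw [List.getD_eq_getElem _ _ (by simpa using hk), List.getD_eq_getElem _ _ hk,
      List.getElem_modify]
    by_cases hik : idx = (k : Int)
    · have ht : idx.toNat = k := by omega
      have hc : idx = (k : Int) ∧ 0 ≤ idx ∧ idx < l := ⟨hik, h⟩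
      rw [if_pos ht, if_pos hc]
    · have ht : idx.toNat ≠ k := by omega
      have hnc : ¬ (idx = (k : Int) ∧ 0 ≤ idx ∧ idx < l) := fun hcc => hik hcc.1
      rw [if_neg ht, if_neg hnc, add_zero]
  · rename_i h
    have hni : ¬ (idx = (k : Int) ∧ 0 ≤ idx ∧ idx < l) := by tauto
    simp [hni]

lemma stepB_getD (prev : List Int) (l : Int) (res : List Int) (j : Int) (k : Nat)
    (hk : k < res.length) (hres : (res.length : Int) = l ∨ l ≤ 0) :
    (stepB prev l res j).getD k 0 = res.getD k 0 + contrib prev l k j := by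
  simp only [stepB, List.foldl_cons, List.foldl_nil]
  rw [condModify_getD (j + 1) l _ _ k
      (by simp only [condModify_length]; exact hk)
      (by simp only [condModify_length]; exact hres),
    condModify_getD (j + 0) l _ _ k
      (by simp only [condModify_length]; exact hk)
      (by simp only [condModify_length]; exact hres),
    condModify_getD (j + -1) l _ _ k hk hres]
  have h1 : j + -1 = j - 1 := by ring
  have h2 : j + 0 = j := by ring
  rw [h1, h2]
  unfold contrib
  ring

lemma foldB_length (prev : List Int) (l : Int) (js : List Int) (res : List Int) :
    (js.foldl (stepB prev l) res).length = res.length := by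
  induction js generalizing res with
  | nil => rfl
  | cons j js ih => simp only [List.foldl_cons]; rw [ih, stepB_length]

lemma foldB_getD (prev : List Int) (l : Int) (js : List Int) (res : List Int) (k : Nat)
    (hk : k < res.length) (hres : (res.length : Int) = l ∨ l ≤ 0) :
    (js.foldl (stepB prev l) res).getD k 0 = res.getD k 0 + (js.map (contrib prev l k)).sum := by
  induction js generalizing res with
  | nil => simp
  | cons j js ih =>
    simp only [List.foldl_cons, List.map_cons, List.sum_cons]
    rw [ih (stepB prev l res j) (by rw [stepB_length]; exact hk)
        (by rw [stepB_length]; exact hres),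
      stepB_getD prev l res j k hk hres]
    ring

lemma contrib_nat (prev : List Int) (l : Int) (k m : Nat) (hkl : (k : Int) < l) :
    contrib prev l k (m : Int) =
      (if (m : Int) = (k : Int) + 1 then PySem.List.pyGetD prev ((k : Int) + 1) 0 else 0) +
      (if m = k then PySem.List.pyGetD prev (k : Int) 0 else 0) +
      (if (m : Int) + 1 = (k : Int) then PySem.List.pyGetD prev ((k : Int) - 1) 0 else 0) := by
  have hk0 : (0 : Int) ≤ (k : Int) := Int.natCast_nonneg k
  have hm0 : (0 : Int) ≤ (m : Int) := Int.natCast_nonneg m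
  unfold contrib
  by_cases h1 : (m : Int) = (k : Int) + 1
  · have c1 : (m : Int) - 1 = (k : Int) ∧ 0 ≤ (m : Int) - 1 ∧ (m : Int) - 1 < l := by omega
    have n2 : ¬ ((m : Int) = (k : Int) ∧ 0 ≤ (m : Int) ∧ (m : Int) < l) := by omega
    have n3 : ¬ ((m : Int) + 1 = (k : Int) ∧ 0 ≤ (m : Int) + 1 ∧ (m : Int) + 1 < l) := by omega
    have n2' : ¬ (m = k) := by omega
    have n3' : ¬ ((m : Int) + 1 = (k : Int)) := by omega
    rw [if_pos c1, if_neg n2, if_neg n3, if_pos h1, if_neg n2', if_neg n3', h1]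
  · by_cases h2 : m = k
    · subst h2
      have c2 : (m : Int) = (m : Int) ∧ 0 ≤ (m : Int) ∧ (m : Int) < l := by omega
      have n1 : ¬ ((m : Int) - 1 = (m : Int) ∧ 0 ≤ (m : Int) - 1 ∧ (m : Int) - 1 < l) := by omega
      have n3 : ¬ ((m : Int) + 1 = (m : Int) ∧ 0 ≤ (m : Int) + 1 ∧ (m : Int) + 1 < l) := by omega
      have n3' : ¬ ((m : Int) + 1 = (m : Int)) := by omega
      rw [if_pos c2, if_neg n1, if_neg n3, if_neg h1, if_pos rfl, if_neg n3']
    · by_cases h3 : (m : Int) + 1 = (k : Int)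
      · have c3 : (m : Int) + 1 = (k : Int) ∧ 0 ≤ (m : Int) + 1 ∧ (m : Int) + 1 < l := by omega
        have n1 : ¬ ((m : Int) - 1 = (k : Int) ∧ 0 ≤ (m : Int) - 1 ∧ (m : Int) - 1 < l) := by omega
        have n2 : ¬ ((m : Int) = (k : Int) ∧ 0 ≤ (m : Int) ∧ (m : Int) < l) := by omega
        have e : (m : Int) = (k : Int) - 1 := by omega
        rw [if_neg n1, if_neg n2, if_pos c3, if_neg h1, if_neg h2, if_pos h3, e]
      · have n1 : ¬ ((m : Int) - 1 = (k : Int) ∧ 0 ≤ (m : Int) - 1 ∧ (m : Int) - 1 < l) := by omega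
        have n2 : ¬ ((m : Int) = (k : Int) ∧ 0 ≤ (m : Int) ∧ (m : Int) < l) := by omega
        have n3 : ¬ ((m : Int) + 1 = (k : Int) ∧ 0 ≤ (m : Int) + 1 ∧ (m : Int) + 1 < l) := by omega
        rw [if_neg n1, if_neg n2, if_neg n3, if_neg h1, if_neg h2, if_neg h3]

set_option maxHeartbeats 1000000 in
lemma sum_contrib (prev : List Int) (l : Int) (k : Nat) (hkl : (k : Int) < l) (m : Nat) :
    (((List.range m).map (fun j : Nat => contrib prev l k (j : Int))).sum) =
      (if 1 ≤ k ∧ (k : Int) - 1 < (m : Int) then PySem.List.pyGetD prev ((k : Int) - 1) 0 else 0) +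
      (if k < m then PySem.List.pyGetD prev (k : Int) 0 else 0) +
      (if (k : Int) + 1 < (m : Int) then PySem.List.pyGetD prev ((k : Int) + 1) 0 else 0) := by
  induction m with
  | zero =>
    simp only [List.range_zero, List.map_nil, List.sum_nil, Nat.cast_zero]
    split_ifs <;> (first | rfl | omega)
  | succ m ih =>
    rw [List.range_succ, List.map_append, List.sum_append]
    simp only [List.map_cons, List.map_nil, List.sum_cons, List.sum_nil, add_zero]
    rw [ih, contrib_nat prev l k m hkl]
    have hk0 : (0 : Int) ≤ (k : Int) := Int.natCast_nonneg k
    generalize PySem.List.pyGetD prev ((k : Int) - 1) 0 = a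
    generalize PySem.List.pyGetD prev ((k : Int)) 0 = b
    generalize PySem.List.pyGetD prev ((k : Int) + 1) 0 = c
    split_ifs <;> (first | (exfalso; omega) | ring)

lemma pyRange_zero_toNat (l : Int) :
    PySem.List.pyRange 0 l 1 = (List.range l.toNat).map (fun k : Nat => (k : Int)) := by
  by_cases h : 0 ≤ l
  · have e : l = ((l.toNat : Nat) : Int) := by omega
    conv_lhs => rw [e]
    exact PySem.List.pyRange_zero_natCast l.toNat
  · have e : l.toNat = 0 := by omega
    rw [e]
    simp [PySem.List.pyRange]
    omega

-- A as a map of the gather value over the output indices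
lemma addPath_eq_map (prev : List Int) (delta : Int) :
    addPath prev delta =
      (List.range ((prev.length : Int) + delta).toNat).map (fun k : Nat => gA prev (k : Int)) := by
  unfold addPath
  rw [pyRange_zero_toNat, List.foldl_map]
  exact PySem.List.foldl_append_singleton_eq_map (fun k : Nat => gA prev (k : Int)) _ []

lemma gA_eq_sum (prev : List Int) (delta : Int) (k : Nat)
    (hk : k < ((prev.length : Int) + delta).toNat) :
    gA prev (k : Int) =
      (((List.range prev.length).map
          (fun j : Nat => contrib prev ((prev.length : Int) + delta) k (j : Int))).sum) := by
  have hkl : (k : Int) < (prev.length : Int) + delta := by omega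
  rw [sum_contrib prev _ k hkl prev.length]
  have hk0 : (0 : Int) ≤ (k : Int) := Int.natCast_nonneg k
  simp only [gA]
  generalize PySem.List.pyGetD prev ((k : Int) - 1) 0 = a
  generalize PySem.List.pyGetD prev ((k : Int)) 0 = b
  generalize PySem.List.pyGetD prev ((k : Int) + 1) 0 = c
  split_ifs <;> (first | (exfalso; omega) | ring)

-- ===== VERDICT (by name: the statement is the Claim_ definition above) =====
theorem addPath_spec : Claim_equal_addPath := by
  unfold Claim_equal_addPath
  intro prev delta _
  unfold Spec_addPath
  have hBdef : addPath_alt prev delta =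
      (PySem.List.pyRange 0 (prev.length : Int) 1).foldl
        (stepB prev ((prev.length : Int) + delta))
        (List.replicate ((prev.length : Int) + delta).toNat 0) := rfl
  have hlen : (addPath_alt prev delta).length = ((prev.length : Int) + delta).toNat := by
    rw [hBdef, foldB_length]; simp
  rw [addPath_eq_map]
  apply List.ext_getElem
  · simp [hlen]
  · intro k hk1 hk2
    have hkL : k < ((prev.length : Int) + delta).toNat := by rw [← hlen]; exact hk2
    have hrepl : (List.replicate ((prev.length : Int) + delta).toNat (0 : Int)).length
        = ((prev.length : Int) + delta).toNat := by simp
    have hres : ((List.replicate ((prev.length : Int) + delta).toNat (0 : Int)).length : Int)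
        = (prev.length : Int) + delta ∨ (prev.length : Int) + delta ≤ 0 := by
      rw [hrepl]; omega
    have hget : (addPath_alt prev delta).getD k 0 =
        (List.replicate ((prev.length : Int) + delta).toNat (0 : Int)).getD k 0 +
          ((PySem.List.pyRange 0 (prev.length : Int) 1).map
            (contrib prev ((prev.length : Int) + delta) k)).sum := by
      rw [hBdef]
      exact foldB_getD prev _ _ _ k (by rw [hrepl]; exact hkL) hres
    have hzero : (List.replicate ((prev.length : Int) + delta).toNat (0 : Int)).getD k 0 = 0 := by
      rw [List.getD_eq_getElem _ _ (by rw [hrepl]; exact hkL)]; simp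
    rw [← List.getD_eq_getElem (addPath_alt prev delta) 0 hk2, hget, hzero, zero_add]
    rw [pyRange_zero_toNat, List.map_map]
    simp only [List.getElem_map, List.getElem_range]
    rw [gA_eq_sum prev delta k hkL]
    simp [Function.comp_def]
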